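-- pv_equiv track=rewrite | github.com/swerik-project/valtiopaivat-scripts | src/prot-pipe/alto-to-tei.py | get_alto_packages
-- ===== SOURCE A (Python) =====
-- def get_alto_packages(alto_files):
--     packages = {}
--     for f in alto_files:
--         package = '/'.join(f.split('/')[:-1])
--         if package not in packages:
--             packages[package] = [f]
--         else:
--             packages[package].append(f)
--     return packages
-- ===== SOURCE B (Python) =====
-- def get_alto_packages(alto_files):
--     def parent(f):
--         return '/'.join(f.split('/')[:-1])
--     keys = list(dict.fromkeys(parent(f) for f in alto_files))
--     return {k: [f for f in alto_files if parent(f) == k] for k in keys}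
-- ===== Notes on version B (the rewrite author's own statement) =====
-- stated objective: alternative
-- what changed: B replaces A's single hashing pass that mutates per-key lists with a two-phase plan: dedup the parent keys in first-occurrence order, then build each group by filtering the whole file list per key.
import Mathlib
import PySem

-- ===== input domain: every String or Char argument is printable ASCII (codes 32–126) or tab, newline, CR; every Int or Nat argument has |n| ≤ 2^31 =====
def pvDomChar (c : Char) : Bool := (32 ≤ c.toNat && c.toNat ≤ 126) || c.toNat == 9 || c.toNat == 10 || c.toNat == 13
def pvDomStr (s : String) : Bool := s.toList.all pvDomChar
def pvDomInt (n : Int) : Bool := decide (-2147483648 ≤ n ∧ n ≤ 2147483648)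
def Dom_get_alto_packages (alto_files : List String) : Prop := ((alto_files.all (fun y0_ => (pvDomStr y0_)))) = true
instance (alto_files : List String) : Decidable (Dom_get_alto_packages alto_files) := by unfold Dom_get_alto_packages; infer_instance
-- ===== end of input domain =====

-- B groups by first dedup-ing the parent keys and then filtering the file list per key,
-- instead of A's single pass that mutates per-key lists in a dict (alternative decomposition, not faster).

-- ===== PORT A =====
-- shared helper: '/'.join(f.split('/')[:-1])
def pvParent (f : String) : String :=
  PySem.Str.join "/" (PySem.List.slice ((PySem.Str.split? f "/").getD []) none (some (-1)))

def get_alto_packages (alto_files : List String) : List (String × List String) :=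
  (alto_files.foldl
    (fun (packages : PySem.Dict String (List String)) f =>
      let package := pvParent f
      if packages.contains package = false then packages.insert package [f]
      else packages.modify package [] (fun v => v ++ [f]))
    PySem.Dict.empty).items

-- ===== PORT B =====
def get_alto_packages_alt (alto_files : List String) : List (String × List String) :=
  let keys := PySem.List.dedup (alto_files.map pvParent)
  keys.map (fun k => (k, alto_files.filter (fun f => pvParent f == k)))

-- ===== PRECONDITION & SPEC =====
def Spec_get_alto_packages (alto_files : List String) (out : List (String × List String)) : Prop := out = get_alto_packages_alt alto_files
instance (alto_files : List String) (out : List (String × List String)) : Decidable (Spec_get_alto_packages alto_files out) := by unfold Spec_get_alto_packages; infer_instance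

-- ===== CLAIM (what is proved, stated in full; the proofs are below) =====
def Claim_equal_get_alto_packages : Prop := ∀ (alto_files : List String), Dom_get_alto_packages alto_files → Spec_get_alto_packages alto_files (get_alto_packages alto_files)

-- ===== LEMMAS AND PROOFS =====

-- the loop body of A is extensionally the 'modify with default []' step
theorem pvStep_eq (d : PySem.Dict String (List String)) (f : String) :
    (if d.contains (pvParent f) = false then d.insert (pvParent f) [f]
     else d.modify (pvParent f) [] (fun v => v ++ [f]))
      = d.modify (pvParent f) [] (fun v => v ++ [f]) := by
  by_cases h : d.contains (pvParent f) = false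
  · rw [if_pos h]
    show d.insert (pvParent f) [f] = d.insert (pvParent f) ((d.getD (pvParent f) []) ++ [f])
    rw [PySem.Dict.getD_of_not_contains d [] h, List.nil_append]
  · rw [if_neg h]

-- the value A's loop accumulates at key k is the filter of the suffix appended to the start value
theorem pvGetD_foldl (l : List String) (d : PySem.Dict String (List String)) (k : String) :
    (l.foldl (fun d f => d.modify (pvParent f) [] (fun v => v ++ [f])) d).getD k []
      = d.getD k [] ++ l.filter (fun f => pvParent f == k) := by
  induction l generalizing d with
  | nil => simp
  | cons f t ih =>
    simp only [List.foldl_cons, List.filter_cons]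
    rw [ih]
    by_cases h : pvParent f = k
    · rw [PySem.Dict.getD_modify]
      simp [h]
    · rw [PySem.Dict.getD_modify]
      simp [h, Ne.symm h]

-- ===== VERDICT (by name: the statement is the Claim_ definition above) =====
theorem get_alto_packages_spec : Claim_equal_get_alto_packages := by
  intro alto_files _
  unfold Spec_get_alto_packages get_alto_packages get_alto_packages_alt
  have hfold : alto_files.foldl
      (fun (packages : PySem.Dict String (List String)) f =>
        let package := pvParent f
        if packages.contains package = false then packages.insert package [f]
        else packages.modify package [] (fun v => v ++ [f]))
      PySem.Dict.empty
    = alto_files.foldl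
        (fun d f => d.modify (pvParent f) [] (fun v => v ++ [f])) PySem.Dict.empty := by
    have : (fun (packages : PySem.Dict String (List String)) f =>
        if packages.contains (pvParent f) = false then packages.insert (pvParent f) [f]
        else packages.modify (pvParent f) [] (fun v => v ++ [f]))
      = (fun d f => d.modify (pvParent f) [] (fun v => v ++ [f])) := by
      funext d f; exact pvStep_eq d f
    simp only [this]
  rw [hfold]
  set D := alto_files.foldl
    (fun (d : PySem.Dict String (List String)) f =>
      d.modify (pvParent f) [] (fun v => v ++ [f])) PySem.Dict.empty with hD
  have hnd : D.keys.Nodup := by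
    rw [hD]
    exact PySem.Dict.nodup_keys_foldl_modify_key alto_files pvParent []
      (fun d f v => v ++ [f]) PySem.Dict.empty PySem.Dict.nodup_keys_empty
  have hkeys : D.keys = PySem.List.dedup (alto_files.map pvParent) := by
    rw [hD, PySem.Dict.keys_foldl_modify_key, PySem.Dict.keys_empty,
      PySem.Set.update_nil_left, PySem.List.dedup_eq_ofList]
  rw [PySem.Dict.items_eq_map_keys D hnd [], hkeys]
  apply List.map_congr_left
  intro k _
  rw [hD, pvGetD_foldl]
  simp
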